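-- pv_equiv track=rewrite | github.com/Axelqv/simulation-of-complex-systems | HomeWork4/in python/main.py | simplify_sequence
-- ===== SOURCE A (Python) =====
-- def simplify_sequence(sequence):
--     result = []
--     i = 0
--     while i < len(sequence):
--         if sequence[i] in sequence[i + 1:]:  # if the current node is repeated
--             i = sequence.index(sequence[i], i + 1)  # find the next index of the repeated node
--         else:
--             result.append(sequence[i])  # if the current node is not repeated, append it to the simplified sequence
--             i += 1
--     return result
-- ===== SOURCE B (Python) =====
-- def simplify_sequence(sequence):
--     # Single forward pass with incremental loop erasure: on revisiting a node,
--     # truncate the path back to its first (kept) occurrence.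
--     result = []
--     for x in sequence:
--         if x in result:
--             idx = result.index(x)
--             del result[idx + 1:]
--         else:
--             result.append(x)
--     return result
-- ===== Notes on version B (the rewrite author's own statement) =====
-- stated objective: simpler
-- what changed: Replaces A's while-loop that repeatedly scans the suffix and jumps the index to the next occurrence of a repeated node with a single forward pass that keeps the current loop-erased path and, on revisiting a node, truncates the path back to that node's first kept occurrence.
import Mathlib
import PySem

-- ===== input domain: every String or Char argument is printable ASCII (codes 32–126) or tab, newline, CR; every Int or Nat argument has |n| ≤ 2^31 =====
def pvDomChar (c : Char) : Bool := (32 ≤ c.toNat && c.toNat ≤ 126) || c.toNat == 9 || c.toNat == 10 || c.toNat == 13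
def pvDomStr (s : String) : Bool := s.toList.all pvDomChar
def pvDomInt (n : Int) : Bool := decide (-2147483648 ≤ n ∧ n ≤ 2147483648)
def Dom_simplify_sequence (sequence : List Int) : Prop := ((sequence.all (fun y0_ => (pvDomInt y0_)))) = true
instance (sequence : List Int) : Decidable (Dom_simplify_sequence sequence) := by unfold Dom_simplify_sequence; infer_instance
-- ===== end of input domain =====

-- B replaces A's backward-looking jump-to-next-occurrence while-loop by a single forward
-- accumulate-and-truncate pass (incremental loop erasure); simpler, same result.

-- ===== PORT A =====
-- A's while loop: at index i, if sequence[i] occurs in sequence[i+1:] jump to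
-- sequence.index(sequence[i], i+1), else append sequence[i] and step to i+1.
-- i is a nonnegative Python int throughout, so the slice sequence[i+1:] is `drop (i+1)`
-- (PySem.List.slice_from_natCast) and `sequence.index(x, i+1)` is `i+1 + (drop (i+1)).idxOf x`
-- (exact under the membership guard; Python's ValueError is unreachable here).
def simplify_sequenceLoop (s : List Int) (res : List Int) (i : Nat) : List Int :=
  if h : i < s.length then
    let x := s[i]
    if x ∈ s.drop (i + 1) then
      simplify_sequenceLoop s res (i + 1 + (s.drop (i + 1)).idxOf x)
    else
      simplify_sequenceLoop s (res ++ [x]) (i + 1)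
  else
    res
termination_by s.length - i
decreasing_by
  · omega
  · omega

def simplify_sequence (sequence : List Int) : List Int :=
  simplify_sequenceLoop sequence [] 0

-- ===== PORT B =====
-- forward pass: if x already in result, delete everything after its first occurrence,
-- else append x.
def simplify_sequence_alt (sequence : List Int) : List Int :=
  sequence.foldl
    (fun res x => if x ∈ res then res.take (res.idxOf x + 1) else res ++ [x]) []

-- ===== PRECONDITION & SPEC =====
def Spec_simplify_sequence (sequence : List Int) (out : List Int) : Prop := out = simplify_sequence_alt sequence
instance (sequence : List Int) (out : List Int) : Decidable (Spec_simplify_sequence sequence out) := by unfold Spec_simplify_sequence; infer_instance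

-- ===== CLAIM (what is proved, stated in full; the proofs are below) =====
def Claim_equal_simplify_sequence : Prop := ∀ (sequence : List Int), Dom_simplify_sequence sequence → Spec_simplify_sequence sequence (simplify_sequence sequence)

-- ===== LEMMAS AND PROOFS =====

-- the suffix of t strictly after the last occurrence of x (all of t if x ∉ t)
def tailAfter (x : Int) (t : List Int) : List Int :=
  (t.reverse.takeWhile (fun y => y ≠ x)).reverse

theorem tailAfter_length_le (x : Int) (t : List Int) : (tailAfter x t).length ≤ t.length := by
  unfold tailAfter
  rw [List.length_reverse]
  simpa using (List.takeWhile_prefix (l := t.reverse) (fun y => y ≠ x)).length_le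

-- the common specification: loop-erased walk, recursing past the last occurrence of the head
def leWalk : List Int → List Int
  | [] => []
  | x :: t => x :: leWalk (tailAfter x t)
termination_by l => l.length
decreasing_by
  have := tailAfter_length_le x t
  simpa using Nat.lt_succ_of_le this

theorem tailAfter_of_not_mem (x : Int) (t : List Int) (h : x ∉ t) : tailAfter x t = t := by
  have : t.reverse.takeWhile (fun y => y ≠ x) = t.reverse := by
    apply List.takeWhile_eq_self_iff.mpr
    intro a ha
    simp only [List.mem_reverse] at ha
    simp only [decide_eq_true_eq]
    rintro rfl; exact h ha
  unfold tailAfter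
  rw [this, List.reverse_reverse]

theorem takeWhile_ne_append_cons (x : Int) (w z : List Int) :
    (w ++ x :: z).takeWhile (fun y => y ≠ x) = w.takeWhile (fun y => y ≠ x) := by
  induction w with
  | nil => simp
  | cons a w ih =>
    by_cases h : a = x
    · simp [h]
    · simpa [List.takeWhile_cons, h] using ih

theorem tailAfter_middle (x : Int) (u v : List Int) :
    tailAfter x (u ++ x :: v) = tailAfter x v := by
  have : (u ++ x :: v).reverse = v.reverse ++ x :: u.reverse := by simp
  rw [tailAfter, this, takeWhile_ne_append_cons, tailAfter]

theorem tailAfter_concat_self (x : Int) (t : List Int) : tailAfter x (t ++ [x]) = [] := by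
  simpa using tailAfter_middle x t []

theorem tailAfter_concat_ne (x y : Int) (t : List Int) (h : x ≠ y) :
    tailAfter y (t ++ [x]) = tailAfter y t ++ [x] := by
  simp [tailAfter, h]

-- appending one element to the sequence performs one step of incremental loop erasure on leWalk
theorem leWalk_concat (p : List Int) (x : Int) :
    leWalk (p ++ [x]) =
      if x ∈ leWalk p then (leWalk p).take ((leWalk p).idxOf x + 1) else leWalk p ++ [x] := by
  match p with
  | [] => simp [leWalk, tailAfter]
  | y :: t =>
    by_cases hxy : x = y
    · subst hxy
      rw [show (x :: t) ++ [x] = x :: (t ++ [x]) from rfl]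
      rw [leWalk, leWalk, tailAfter_concat_self, leWalk]
      simp [List.idxOf_cons_self]
    · rw [show (y :: t) ++ [x] = y :: (t ++ [x]) from rfl]
      rw [leWalk, leWalk, tailAfter_concat_ne x y t hxy]
      have ih := leWalk_concat (tailAfter y t) x
      rw [ih]
      by_cases hm : x ∈ leWalk (tailAfter y t)
      · simp [hm, hxy, List.idxOf_cons_ne _ (fun h => hxy h.symm), List.take_succ_cons]
      · simp [hm, hxy]
termination_by p.length
decreasing_by
  have := tailAfter_length_le y t
  simpa using Nat.lt_succ_of_le this

theorem alt_eq_leWalk (p : List Int) : simplify_sequence_alt p = leWalk p := by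
  induction p using List.reverseRecOn with
  | nil => simp [simplify_sequence_alt, leWalk]
  | append_singleton p x ih =>
    rw [leWalk_concat]
    simp only [simplify_sequence_alt, List.foldl_append, List.foldl_cons, List.foldl_nil] at *
    rw [ih]

theorem loop_eq_leWalk (s : List Int) (i : Nat) (res : List Int) :
    simplify_sequenceLoop s res i = res ++ leWalk (s.drop i) := by
  by_cases h : i < s.length
  · have hdrop : s.drop i = s[i] :: s.drop (i + 1) := List.drop_eq_getElem_cons h
    set x := s[i] with hx
    by_cases hm : x ∈ s.drop (i + 1)
    · set t := s.drop (i + 1) with ht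
      set k := t.idxOf x with hk
      have hklt : k < t.length := List.idxOf_lt_length_of_mem hm
      have hget : t[k] = x := List.getElem_idxOf hklt
      have hsplit : t = t.take k ++ x :: t.drop (k + 1) := by
        conv_lhs => rw [← List.take_append_drop k t]
        congr 1
        rw [List.drop_eq_getElem_cons hklt, hget]
      have hdrop2 : s.drop (i + 1 + k) = x :: t.drop (k + 1) := by
        rw [← List.drop_drop, ← ht, List.drop_eq_getElem_cons hklt, hget]
      have ih := loop_eq_leWalk s (i + 1 + k) res
      rw [simplify_sequenceLoop]
      simp only [h, dif_pos, ← hx, ← ht, ← hk, if_pos hm]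
      rw [ih, hdrop2, hdrop, leWalk, leWalk]
      rw [show tailAfter x t = tailAfter x (t.drop (k + 1)) from by
        conv_lhs => rw [hsplit]
        exact tailAfter_middle x (t.take k) (t.drop (k + 1))]
    · have ih := loop_eq_leWalk s (i + 1) (res ++ [x])
      rw [simplify_sequenceLoop]
      simp only [h, dif_pos, ← hx, if_neg hm]
      rw [ih, hdrop, leWalk, tailAfter_of_not_mem x _ hm]
      simp
  · have : s.drop i = [] := List.drop_eq_nil_of_le (by omega)
    rw [simplify_sequenceLoop]
    simp [h, this, leWalk]
termination_by s.length - i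
decreasing_by
  · omega
  · omega

-- ===== VERDICT (by name: the statement is the Claim_ definition above) =====
theorem simplify_sequence_spec : Claim_equal_simplify_sequence := by
  intro s _
  unfold Spec_simplify_sequence simplify_sequence
  rw [loop_eq_leWalk, alt_eq_leWalk]
  simp
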